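-- pv_equiv track=rewrite | github.com/nikolakulikova/pokus | DockerChecker.py | _check_bind
-- ===== SOURCE A (Python) =====
-- def _check_bind(val: list) -> bool:
--     was_required = False
--     for option in val:
--         if "=" not in option:
--             return False
--         option = option.split("=")
--         op = option[0].strip()
--         value = option[1].strip()
--         if op in ["target", "source", "from"]:
--             if op == "target":
--                 was_required = True
--             if value == "":
--                 return False
--         elif op in ["rw", "readwrite"]:
--             if value != "":
--                 return False
--     if not was_required:
--         return False
--     return True
-- ===== SOURCE B (Python) =====
-- def _check_bind(val: list) -> bool:
--     def ok(option):
--         if "=" not in option: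
--             return False
--         parts = option.split("=")
--         op = parts[0].strip()
--         value = parts[1].strip()
--         if op in ("target", "source", "from"):
--             return value != ""
--         if op in ("rw", "readwrite"):
--             return value == ""
--         return True
--
--     def is_target(option):
--         return "=" in option and option.split("=")[0].strip() == "target"
--
--     return all(ok(o) for o in val) and any(is_target(o) for o in val)
-- ===== Notes on version B (the rewrite author's own statement) =====
-- stated objective: simpler
-- what changed: Replaces A's single fused early-return loop carrying a was_required flag with two independent quantifier passes: a per-option validity predicate checked with all(), plus an any() pass detecting a target option.
import Mathlib
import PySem

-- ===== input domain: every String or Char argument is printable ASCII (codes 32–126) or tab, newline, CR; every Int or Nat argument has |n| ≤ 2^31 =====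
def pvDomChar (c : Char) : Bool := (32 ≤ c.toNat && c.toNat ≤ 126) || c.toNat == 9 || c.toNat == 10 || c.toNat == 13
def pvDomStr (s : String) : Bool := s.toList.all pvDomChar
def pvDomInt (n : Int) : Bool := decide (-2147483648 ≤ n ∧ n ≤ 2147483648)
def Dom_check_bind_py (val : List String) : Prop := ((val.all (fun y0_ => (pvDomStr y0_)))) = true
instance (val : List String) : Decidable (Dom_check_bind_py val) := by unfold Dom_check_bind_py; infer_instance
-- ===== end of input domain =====

-- B replaces A's single fused early-return loop carrying a was_required flag with two
-- independent quantifier passes: all options valid, and some option names a target (simpler).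

-- ===== PORT A =====
-- the fused loop of A: walks the options carrying the was_required flag, early-returning false
def checkBindGo : List String → Bool → Bool
  | [], wasRequired => wasRequired
  | option :: rest, wasRequired =>
    if !(PySem.Str.isIn "=" option) then false
    else
      let parts := (PySem.Str.split? option "=").getD []
      -- option[0]/option[1]: sep "=" is nonempty so split? is some, and "=" in option guarantees ≥ 2 pieces; the getD defaults are never taken
      let op := PySem.Str.strip ((PySem.List.pyGet? parts 0).getD "")
      let value := PySem.Str.strip ((PySem.List.pyGet? parts 1).getD "")
      if op = "target" || op = "source" || op = "from" then
        let wasRequired := if op = "target" then true else wasRequired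
        if value = "" then false else checkBindGo rest wasRequired
      else if op = "rw" || op = "readwrite" then
        if value ≠ "" then false else checkBindGo rest wasRequired
      else checkBindGo rest wasRequired

def check_bind_py (val : List String) : Bool := checkBindGo val false

-- ===== PORT B =====
-- per-option validity predicate (Source B's ok)
def bindOk (option : String) : Bool :=
  if !(PySem.Str.isIn "=" option) then false
  else
    let parts := (PySem.Str.split? option "=").getD []
    let op := PySem.Str.strip ((PySem.List.pyGet? parts 0).getD "")
    let value := PySem.Str.strip ((PySem.List.pyGet? parts 1).getD "")
    if op = "target" || op = "source" || op = "from" then value ≠ ""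
    else if op = "rw" || op = "readwrite" then value = ""
    else true

-- Source B's is_target
def bindIsTarget (option : String) : Bool :=
  PySem.Str.isIn "=" option &&
    PySem.Str.strip ((PySem.List.pyGet? ((PySem.Str.split? option "=").getD []) 0).getD "") = "target"

def check_bind_py_alt (val : List String) : Bool :=
  val.all bindOk && val.any bindIsTarget

-- ===== PRECONDITION & SPEC =====
def Spec_check_bind_py (val : List String) (out : Bool) : Prop := out = check_bind_py_alt val
instance (val : List String) (out : Bool) : Decidable (Spec_check_bind_py val out) := by unfold Spec_check_bind_py; infer_instance

-- ===== CLAIM (what is proved, stated in full; the proofs are below) =====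
def Claim_equal_check_bind_py : Prop := ∀ (val : List String), Dom_check_bind_py val → Spec_check_bind_py val (check_bind_py val)

-- ===== LEMMAS AND PROOFS =====
-- loop invariant for A's fused loop: it equals "all remaining options valid, and the flag
-- is already set or some remaining option is a target"
theorem checkBindGo_eq (val : List String) :
    ∀ wr : Bool, checkBindGo val wr = (val.all bindOk && (wr || val.any bindIsTarget)) := by
  induction val with
  | nil => intro wr; simp [checkBindGo]
  | cons o rest ih =>
    intro wr
    simp only [checkBindGo, bindOk, bindIsTarget, List.all_cons, List.any_cons]
    by_cases hin : PySem.Str.isIn "=" o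
    · simp only [hin]
      set op := PySem.Str.strip ((PySem.List.pyGet? ((PySem.Str.split? o "=").getD []) 0).getD "") with hop
      set value := PySem.Str.strip ((PySem.List.pyGet? ((PySem.Str.split? o "=").getD []) 1).getD "") with hval
      by_cases h1 : op = "target" <;> by_cases hv : value = "" <;>
        simp [h1, hv, ih] <;>
        by_cases h2 : op = "source" <;> by_cases h3 : op = "from" <;>
        by_cases h4 : op = "rw" <;> by_cases h5 : op = "readwrite" <;>
        simp_all [ih] <;> cases wr <;> simp
    · have hin' : PySem.Chars.isIn ['='] o.toList = false := by simpa using hin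
      simp [hin']

-- ===== VERDICT (by name: the statement is the Claim_ definition above) =====
theorem check_bind_py_spec : Claim_equal_check_bind_py := by
  intro val _
  unfold Spec_check_bind_py check_bind_py check_bind_py_alt
  simp [checkBindGo_eq]
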